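-- pv_equiv track=rewrite | github.com/manimanis/4T_2021 | codes/chapitre04/triangulaire.py | transfert
-- ===== SOURCE A (Python) =====
-- def calc_score(nom):
--     s = 0
--     for i in range(len(nom)):
--         s += ord(nom[i].upper()) - 64
--     return s
--
-- def transfert(np, n, nt, st):
--     n2 = 0
--     for i in range(n):
--         score = calc_score(np[i])
--         if est_triangulaire(score):
--             nt[n2] = np[i]
--             st[n2] = score
--             n2 += 1
--     return n2
--
-- def est_triangulaire(score):
--     i = 1
--     while score >= i:
--         score -= i
--         i += 1
--     return score == 0
-- ===== SOURCE B (Python) =====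
-- def calc_score(nom):
--     return sum(ord(c.upper()) - 64 for c in nom)
--
-- def transfert(np, n, nt, st):
--     names = [np[i] for i in range(n)]
--     scores = [calc_score(nom) for nom in names]
--     m = 0
--     for s in scores:
--         if s > m:
--             m = s
--     tris = []
--     t, k = 0, 1
--     while t <= m:
--         tris.append(t)
--         t += k
--         k += 1
--     n2 = 0
--     for nom, s in zip(names, scores):
--         if s in tris:
--             nt[n2] = nom
--             st[n2] = s
--             n2 += 1
--     return n2
-- ===== Notes on version B (the rewrite author's own statement) =====
-- stated objective: alternative
-- what changed: B precomputes in one pass all scores and their maximum, builds the shared table of triangular numbers up to that maximum once, and replaces A's per-name subtraction-loop test est_triangulaire by a membership test in that table.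
-- outside the precondition, e.g. on transfert(['B'], 1, [], []): A returns 0, B returns 0; on transfert(['ABC'], 2, ['x', 'y'], [0, 0]): A raises IndexError, B raises IndexError
import Mathlib
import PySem

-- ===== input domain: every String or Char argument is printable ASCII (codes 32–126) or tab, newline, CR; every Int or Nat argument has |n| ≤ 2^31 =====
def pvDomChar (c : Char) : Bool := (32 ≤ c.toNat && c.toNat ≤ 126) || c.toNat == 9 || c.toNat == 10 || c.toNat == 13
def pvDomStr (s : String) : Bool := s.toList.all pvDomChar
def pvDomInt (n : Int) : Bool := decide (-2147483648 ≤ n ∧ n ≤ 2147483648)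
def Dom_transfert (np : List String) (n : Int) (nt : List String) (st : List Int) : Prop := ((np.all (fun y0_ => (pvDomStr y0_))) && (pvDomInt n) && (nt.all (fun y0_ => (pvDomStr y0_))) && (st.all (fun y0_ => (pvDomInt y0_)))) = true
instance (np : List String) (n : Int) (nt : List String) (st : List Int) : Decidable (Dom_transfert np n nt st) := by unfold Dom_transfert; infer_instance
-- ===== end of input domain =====

-- B precomputes all scores and a shared table of triangular numbers up to their maximum, replacing
-- A's per-name subtraction-loop test by a membership test (alternative algorithm, similar cost).
-- A and B mutate nt/st identically via writes; the equivalence proved here is about the RETURN value.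


-- ===== PORT A =====
-- ord(c.upper()) : hand-ported, exact on the ASCII domain (Dom), where str.upper maps only 'a'..'z'
def ordUp (c : Char) : Int :=
  if 97 ≤ c.toNat ∧ c.toNat ≤ 122 then (c.toNat : Int) - 32 else (c.toNat : Int)

-- calc_score: loop over the characters of nom accumulating s
def calcScore (nom : String) : Int :=
  nom.toList.foldl (fun s c => s + (ordUp c - 64)) 0

-- est_triangulaire's while loop; j encodes i - 1 so that i = j + 1 ≥ 1 (termination)
def estTriAux (score : Int) (j : Nat) : Bool :=
  if score ≥ (j : Int) + 1 then estTriAux (score - ((j : Int) + 1)) (j + 1) else score == 0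
termination_by score.toNat
decreasing_by omega

def estTriangulaire (score : Int) : Bool := estTriAux score 0

def transfert (np : List String) (n : Int) (nt : List String) (st : List Int) : Int :=
  ((List.range n.toNat).foldl
    (fun (acc : List String × List Int × Int) i =>
      let nom := (PySem.List.pyGet? np (i : Int)).getD ""
      let score := calcScore nom
      if estTriangulaire score then
        (acc.1.set acc.2.2.toNat nom, acc.2.1.set acc.2.2.toNat score, acc.2.2 + 1)
      else acc)
    (nt, st, 0)).2.2

-- ===== PORT B =====
def calcScoreB (nom : String) : Int :=
  (nom.toList.map (fun c => ordUp c - 64)).sum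

-- the while loop building tris; j encodes k - 1 so that k = j + 1 ≥ 1 (termination)
def trisUpTo (t : Int) (j : Nat) (m : Int) : List Int :=
  if h : t ≤ m then t :: trisUpTo (t + ((j : Int) + 1)) (j + 1) m else []
termination_by (m + 1 - t).toNat
decreasing_by omega

def transfert_alt (np : List String) (n : Int) (nt : List String) (st : List Int) : Int :=
  let names := (List.range n.toNat).map (fun i => (PySem.List.pyGet? np (i : Int)).getD "")
  let scores := names.map calcScoreB
  let m := scores.foldl (fun m s => if s > m then s else m) 0
  let tris := trisUpTo 0 0 m
  ((names.zip scores).foldl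
    (fun (acc : List String × List Int × Int) p =>
      if tris.contains p.2 then
        (acc.1.set acc.2.2.toNat p.1, acc.2.1.set acc.2.2.toNat p.2, acc.2.2 + 1)
      else acc)
    (nt, st, 0)).2.2

-- ===== PRECONDITION & SPEC =====
-- Pre_ excludes inputs where A raises IndexError (n > len(np), or a write past the end of nt/st);
-- requiring n slots in nt/st is slightly narrower than A's exact success set (A succeeds when the
-- triangular names happen to fit), but it is the natural closed-form bound since A writes at most n slots.
def Pre_transfert (np : List String) (n : Int) (nt : List String) (st : List Int) : Prop :=
  n ≤ (np.length : Int) ∧ n ≤ (nt.length : Int) ∧ n ≤ (st.length : Int)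
instance (np : List String) (n : Int) (nt : List String) (st : List Int) : Decidable (Pre_transfert np n nt st) := by unfold Pre_transfert; infer_instance

def pvWitness_transfert : List String × Int × List String × List Int := (["ABC"], 1, ["x"], [0])

def Spec_transfert (np : List String) (n : Int) (nt : List String) (st : List Int) (out : Int) : Prop := out = transfert_alt np n nt st
instance (np : List String) (n : Int) (nt : List String) (st : List Int) (out : Int) : Decidable (Spec_transfert np n nt st out) := by unfold Spec_transfert; infer_instance

-- ===== CLAIM (what is proved, stated in full; the proofs are below) =====
def Claim_equal_transfert : Prop := ∀ (np : List String) (n : Int) (nt : List String) (st : List Int), Dom_transfert np n nt st → Pre_transfert np n nt st → Spec_transfert np n nt st (transfert np n nt st)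

-- ===== LEMMAS AND PROOFS =====

-- triSeg j d = (j+1) + (j+2) + … + (j+d), the amount the two loops both consume
def triSeg (j d : Nat) : Int :=
  match d with
  | 0 => 0
  | d + 1 => ((j : Int) + 1) + triSeg (j + 1) d

theorem triSeg_nonneg (d j : Nat) : 0 ≤ triSeg j d := by
  induction d generalizing j with
  | zero => simp [triSeg]
  | succ d ih => have := ih (j + 1); simp [triSeg]; omega

theorem estTriAux_iff (s : Int) (j : Nat) :
    estTriAux s j = true ↔ ∃ d, s = triSeg j d := by
  fun_induction estTriAux s j with
  | case1 s j hge ih =>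
    rw [ih]
    constructor
    · rintro ⟨d, hd⟩
      refine ⟨d + 1, ?_⟩
      have he : triSeg j (d + 1) = ((j : Int) + 1) + triSeg (j + 1) d := rfl
      omega
    · rintro ⟨d, rfl⟩
      cases d with
      | zero => simp only [triSeg] at hge; omega
      | succ d =>
        refine ⟨d, ?_⟩
        have he : triSeg j (d + 1) = ((j : Int) + 1) + triSeg (j + 1) d := rfl
        omega
  | case2 s j hlt =>
    rw [beq_iff_eq]
    constructor
    · rintro rfl; exact ⟨0, rfl⟩
    · rintro ⟨d, rfl⟩
      cases d with
      | zero => rfl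
      | succ d =>
        have h0 := triSeg_nonneg d (j + 1)
        have he : triSeg j (d + 1) = ((j : Int) + 1) + triSeg (j + 1) d := rfl
        omega

theorem mem_trisUpTo (s t : Int) (j : Nat) (m : Int) :
    s ∈ trisUpTo t j m ↔ ∃ d, s = t + triSeg j d ∧ s ≤ m := by
  fun_induction trisUpTo t j m with
  | case1 t j hle ih =>
    rw [List.mem_cons, ih]
    constructor
    · rintro (rfl | ⟨d, hd, hm⟩)
      · exact ⟨0, by simp [triSeg], hle⟩
      · refine ⟨d + 1, ?_, hm⟩
        have he : triSeg j (d + 1) = ((j : Int) + 1) + triSeg (j + 1) d := rfl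
        omega
    · rintro ⟨d, rfl, hm⟩
      cases d with
      | zero => left; simp [triSeg]
      | succ d =>
        right
        refine ⟨d, ?_, hm⟩
        have he : triSeg j (d + 1) = ((j : Int) + 1) + triSeg (j + 1) d := rfl
        omega
  | case2 t j hgt =>
    simp only [List.not_mem_nil, false_iff]
    rintro ⟨d, rfl, hm⟩
    have h0 := triSeg_nonneg d j
    omega

-- running max starting at a bounds every projected element
theorem init_le_runMax {A : Type} (l : List A) (g : A -> Int) (a : Int) :
    a ≤ l.foldl (fun m y => if g y > m then g y else m) a := by
  induction l generalizing a with
  | nil => exact le_rfl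
  | cons z zs ih =>
    simp only [List.foldl_cons]
    exact le_trans (by split <;> omega) (ih _)

theorem le_runMax {A : Type} (l : List A) (g : A -> Int) (a : Int) (x : A) (hx : x ∈ l) :
    g x ≤ l.foldl (fun m y => if g y > m then g y else m) a := by
  induction l generalizing a with
  | nil => simp at hx
  | cons z zs ih =>
    simp only [List.foldl_cons]
    rcases List.mem_cons.mp hx with rfl | hx
    · exact le_trans (by split <;> omega) (init_le_runMax zs g _)
    · exact ih _ hx

-- the two per-element tests agree for a score bounded by m
theorem test_agree (s m : Int) (hs : s ≤ m) :
    (trisUpTo 0 0 m).contains s = estTriangulaire s := by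
  rw [Bool.eq_iff_iff, List.contains_iff_mem, mem_trisUpTo]
  unfold estTriangulaire
  rw [estTriAux_iff]
  constructor
  · rintro ⟨d, hd, _⟩; exact ⟨d, by omega⟩
  · rintro ⟨d, rfl⟩; exact ⟨d, by omega, hs⟩

theorem calcScoreB_eq (nom : String) : calcScoreB nom = calcScore nom := by
  unfold calcScoreB calcScore
  induction nom.toList using List.reverseRecOn with
  | nil => simp
  | append_singleton xs x ih => simp [ih]

-- ===== VERDICT (by name: the statement is the Claim_ definition above) =====
theorem transfert_spec : Claim_equal_transfert := by
  intro np n nt st _ _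
  unfold Spec_transfert transfert transfert_alt
  simp only [List.map_map, List.zip_map', List.foldl_map]
  refine congrArg (fun x : List String × List Int × Int => x.2.2) ?_
  apply PySem.List.foldl_congr_mem
  intro acc i hi
  simp only [Function.comp]
  simp only [calcScoreB_eq]
  rw [test_agree _ _ (le_runMax _ _ _ _ hi)]
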